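-- pv_equiv track=rewrite | github.com/SuperInstance/multibot | orchestrator-master/repo_manager.py | _is_simple_conflict
-- ===== SOURCE A (Python) =====
-- def _is_simple_conflict(content: str) -> bool:
--     """Check if conflict is simple (whitespace, formatting, etc.)."""
--     lines = content.split('\n')
--     conflict_sections = []
--     current_section = []
--     in_conflict = False
--
--     for line in lines:
--         if line.startswith('<<<<<<< '):
--             in_conflict = True
--             current_section = []
--         elif line.startswith('======='):
--             if in_conflict:
--                 conflict_sections.append(('ours', current_section))
--                 current_section = []
--         elif line.startswith('>>>>>>> '):
--             if in_conflict:
--                 conflict_sections.append(('theirs', current_section))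
--                 in_conflict = False
--         elif in_conflict:
--             current_section.append(line)
--
--     # Simple heuristic: if conflicts are mostly whitespace differences
--     for section_type, section_lines in conflict_sections:
--         if len(section_lines) > 10:  # Too complex
--             return False
--
--     return True
-- ===== SOURCE B (Python) =====
-- def _is_simple_conflict(content: str) -> bool:
--     """Check if conflict is simple (whitespace, formatting, etc.)."""
--     def classify(line):
--         if line.startswith('<<<<<<< '):
--             return '<'
--         if line.startswith('======='):
--             return '='
--         if line.startswith('>>>>>>> '):
--             return '>'
--         return None
--
--     # Stage 1: reduce the text to its marker lines (index, kind); content lines vanish.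
--     markers = [(i, t) for i, line in enumerate(content.split('\n'))
--                for t in (classify(line),) if t is not None]
--
--     # Stage 2: judge section sizes purely by index arithmetic between markers.
--     in_conflict = False
--     start = 0
--     for i, t in markers:
--         if t == '<':
--             in_conflict = True
--             start = i
--         elif in_conflict:
--             if i - start - 1 > 10:
--                 return False
--             if t == '=':
--                 start = i
--             else:
--                 in_conflict = False
--     return True
-- ===== Notes on version B (the rewrite author's own statement) =====
-- stated objective: alternative
-- what changed: B first reduces the text to a list of (line-index, marker-kind) pairs and then judges each conflict section by index arithmetic between consecutive markers (i - start - 1 > 10), never collecting or counting the content lines, while A accumulates the actual section lines into a list of (tag, lines) sections and scans their lengths afterwards.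
import Mathlib
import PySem

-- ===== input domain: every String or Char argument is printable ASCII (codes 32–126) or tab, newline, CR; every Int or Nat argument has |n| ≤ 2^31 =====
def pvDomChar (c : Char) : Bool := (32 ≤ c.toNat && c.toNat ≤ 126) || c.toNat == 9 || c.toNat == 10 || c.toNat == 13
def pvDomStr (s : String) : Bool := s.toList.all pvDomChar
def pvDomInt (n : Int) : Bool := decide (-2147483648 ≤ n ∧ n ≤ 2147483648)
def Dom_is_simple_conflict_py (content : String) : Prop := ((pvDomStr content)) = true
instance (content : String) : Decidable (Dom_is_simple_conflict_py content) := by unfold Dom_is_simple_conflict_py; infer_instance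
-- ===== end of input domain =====

-- B first extracts the marker lines as (index, kind) pairs, then judges section sizes
-- by index arithmetic between markers — it never collects or counts content lines ('alternative' objective).

-- ===== PORT A =====
-- state: (conflict_sections, current_section, in_conflict)
def iscA_step (s : List (String × List String) × List String × Bool) (line : String) :
    List (String × List String) × List String × Bool :=
  let (secs, cur, inC) := s
  if PySem.Str.startswith line "<<<<<<< " then (secs, [], true)
  else if PySem.Str.startswith line "=======" then
    if inC then (secs ++ [("ours", cur)], [], inC) else (secs, cur, inC)
  else if PySem.Str.startswith line ">>>>>>> " then
    if inC then (secs ++ [("theirs", cur)], cur, false) else (secs, cur, inC)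
  else if inC then (secs, cur ++ [line], inC) else (secs, cur, inC)

def is_simple_conflict_py (content : String) : Bool :=
  let lines := (PySem.Str.split? content "\n").getD []
  let st := lines.foldl iscA_step ([], [], false)
  -- final for-loop: return False on the first section with more than 10 lines, else True
  st.1.all (fun sec => !(decide (sec.2.length > 10)))

-- ===== PORT B =====
-- classify a line as a marker kind, or none
def iscB_classify (line : String) : Option Char :=
  if PySem.Str.startswith line "<<<<<<< " then some '<'
  else if PySem.Str.startswith line "=======" then some '='
  else if PySem.Str.startswith line ">>>>>>> " then some '>'
  else none

-- stage 2: walk the marker list, measuring sections by index differences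
def iscB_check : List (Int × Char) → Bool → Int → Bool
  | [], _, _ => true
  | (i, t) :: rest, inC, start =>
    if t = '<' then iscB_check rest true i
    else if inC then
      if i - start - 1 > 10 then false
      else if t = '=' then iscB_check rest inC i
      else iscB_check rest false start
    else iscB_check rest inC start

def is_simple_conflict_py_alt (content : String) : Bool :=
  -- stage 1: [(i, t) for i, line in enumerate(lines) for t in (classify(line),) if t is not None]
  let markers := (PySem.List.enumerate ((PySem.Str.split? content "\n").getD [])).filterMap
    (fun p => (iscB_classify p.2).map (fun t => (p.1, t)))
  iscB_check markers false 0

-- ===== PRECONDITION & SPEC =====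
def Spec_is_simple_conflict_py (content : String) (out : Bool) : Prop := out = is_simple_conflict_py_alt content
instance (content : String) (out : Bool) : Decidable (Spec_is_simple_conflict_py content out) := by unfold Spec_is_simple_conflict_py; infer_instance

-- ===== CLAIM (what is proved, stated in full; the proofs are below) =====
def Claim_equal_is_simple_conflict_py : Prop := ∀ (content : String), Dom_is_simple_conflict_py content → Spec_is_simple_conflict_py content (is_simple_conflict_py content)

-- ===== LEMMAS AND PROOFS =====

def iscGood (secs : List (String × List String)) : Bool :=
  secs.all (fun sec => !(decide (sec.2.length > 10)))

-- if a bad section was already recorded, A's final check is false no matter what follows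
lemma iscA_bad (lines : List String) (secs : List (String × List String))
    (cur : List String) (inC : Bool) (h : iscGood secs = false) :
    iscGood (lines.foldl iscA_step (secs, cur, inC)).1 = false := by
  induction lines generalizing secs cur inC with
  | nil => simpa using h
  | cons line rest ih =>
    simp only [List.foldl_cons, iscA_step]
    split_ifs <;>
      first
        | exact ih _ _ _ h
        | (apply ih; simp [iscGood, List.all_append] at h ⊢;
           intro hall; obtain ⟨a, b, hm, hb⟩ := h; have := hall a b hm; omega)

-- main invariant: while all recorded sections are good, A's remainder equals B's marker walk,
-- where (when in conflict) cur.length = n - start - 1 links A's collected lines to B's indices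
lemma iscAB (lines : List String) (secs : List (String × List String))
    (cur : List String) (inC : Bool) (n start : Int)
    (h : iscGood secs = true)
    (hinv : inC = true → n = start + cur.length + 1) :
    iscGood (lines.foldl iscA_step (secs, cur, inC)).1 =
      iscB_check ((PySem.List.enumerate lines n).filterMap
        (fun p => (iscB_classify p.2).map (fun t => (p.1, t)))) inC start := by
  induction lines generalizing secs cur inC n start with
  | nil => simpa [iscB_check] using h
  | cons line rest ih =>
    rw [PySem.List.enumerate_cons]
    simp only [List.foldl_cons, List.filterMap_cons, iscA_step, iscB_classify]
    by_cases h1 : PySem.Chars.startswith line.toList ['<', '<', '<', '<', '<', '<', '<', ' '] = true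
    · simpa [h1, iscB_check] using ih secs [] true (n + 1) n h (by simp)
    · by_cases h2 : PySem.Chars.startswith line.toList ['=', '=', '=', '=', '=', '=', '='] = true
      · cases inC with
        | false =>
          simpa [h1, h2, iscB_check] using ih secs cur false (n + 1) start h (by simp)
        | true =>
          have hc : (n : Int) = start + cur.length + 1 := hinv rfl
          by_cases hlen : cur.length > 10
          · have hgap : n - start - 1 > 10 := by omega
            have hb : iscGood (secs ++ [("ours", cur)]) = false := by
              simp [iscGood, List.all_append]; omega
            simpa [h1, h2, iscB_check, hgap] using iscA_bad rest _ [] true hb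
          · have hgap : ¬ (n - start - 1 > 10) := by omega
            have hg : iscGood (secs ++ [("ours", cur)]) = true := by
              simp only [iscGood, List.all_append] at h ⊢
              simp [h]; omega
            simpa [h1, h2, iscB_check, hgap] using
              ih (secs ++ [("ours", cur)]) [] true (n + 1) n hg (by simp)
      · by_cases h3 : PySem.Chars.startswith line.toList ['>', '>', '>', '>', '>', '>', '>', ' '] = true
        · cases inC with
          | false =>
            simpa [h1, h2, h3, iscB_check] using ih secs cur false (n + 1) start h (by simp)
          | true =>
            have hc : (n : Int) = start + cur.length + 1 := hinv rfl
            by_cases hlen : cur.length > 10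
            · have hgap : n - start - 1 > 10 := by omega
              have hb : iscGood (secs ++ [("theirs", cur)]) = false := by
                simp [iscGood, List.all_append]; omega
              simpa [h1, h2, h3, iscB_check, hgap] using iscA_bad rest _ cur false hb
            · have hgap : ¬ (n - start - 1 > 10) := by omega
              have hg : iscGood (secs ++ [("theirs", cur)]) = true := by
                simp only [iscGood, List.all_append] at h ⊢
                simp [h]; omega
              simpa [h1, h2, h3, iscB_check, hgap] using
                ih (secs ++ [("theirs", cur)]) cur false (n + 1) start hg (by simp)
        · cases inC with
          | false =>
            simpa [h1, h2, h3] using ih secs cur false (n + 1) start h (by simp)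
          | true =>
            have hc : (n : Int) = start + cur.length + 1 := hinv rfl
            simpa [h1, h2, h3] using ih secs (cur ++ [line]) true (n + 1) start h
              (by intro _; simp; omega)

-- ===== VERDICT (by name: the statement is the Claim_ definition above) =====
theorem is_simple_conflict_py_spec : Claim_equal_is_simple_conflict_py := by
  intro content _
  show is_simple_conflict_py content = is_simple_conflict_py_alt content
  unfold is_simple_conflict_py is_simple_conflict_py_alt
  simpa using iscAB ((PySem.Str.split? content "\n").getD []) [] [] false 0 0 rfl (by simp)
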